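-- pv_equiv track=rewrite | github.com/gridvisi/Python_workspace | 3 codewars/6 kyu/6 kyu How Much.py | howmuch
-- ===== SOURCE A (Python) =====
-- def howmuch(m, n):
--     i = min(m, n)
--     j = max(m, n)
--     res = []
--     while (i <= j):
--         if ((i % 9 == 1) and (i %7 == 2)):
--             res.append(["M: " + str(i), "B: " + str(i // 7), "C: " + str(i // 9)])
--         i += 1
--     return res
-- ===== SOURCE B (Python) =====
-- def howmuch(m, n):
--     lo, hi = min(m, n), max(m, n)
--     start = lo + (37 - lo) % 63  # first i >= lo with i % 63 == 37 (CRT of i%9==1, i%7==2)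
--     return [["M: " + str(i), "B: " + str(i // 7), "C: " + str(i // 9)]
--             for i in range(start, hi + 1, 63)]
-- ===== Notes on version B (the rewrite author's own statement) =====
-- stated objective: faster
-- what changed: Replaces the per-integer scan of [min,max] testing i%9==1 and i%7==2 with a CRT closed form: the solutions are exactly i==37 (mod 63), so B jumps to the first such i and steps by 63.
import Mathlib
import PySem

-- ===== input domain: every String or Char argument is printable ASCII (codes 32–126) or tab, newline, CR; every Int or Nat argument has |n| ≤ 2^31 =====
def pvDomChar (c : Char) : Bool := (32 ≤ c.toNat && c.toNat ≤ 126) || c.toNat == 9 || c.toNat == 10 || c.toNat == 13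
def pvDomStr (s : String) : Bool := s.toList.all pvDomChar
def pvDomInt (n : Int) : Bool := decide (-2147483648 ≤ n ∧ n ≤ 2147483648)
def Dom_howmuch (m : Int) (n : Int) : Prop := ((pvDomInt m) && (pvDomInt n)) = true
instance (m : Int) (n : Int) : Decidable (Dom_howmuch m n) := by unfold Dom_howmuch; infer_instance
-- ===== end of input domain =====

-- B replaces A's per-integer scan with the CRT closed form (solutions are exactly i ≡ 37 mod 63), stepping by 63; measurably faster by a constant factor.


-- ===== PORT A =====
-- the row appended for a hit (shared text-building; both Pythons build the same literal strings)
def pvRow (i : Int) : List String :=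
  ["M: " ++ PySem.Int.toStr i,
   "B: " ++ PySem.Int.toStr (PySem.Int.floordiv i 7),
   "C: " ++ PySem.Int.toStr (PySem.Int.floordiv i 9)]

-- A's while loop, step for step: res is the accumulator, i counts up to j
def howmuchLoop (i j : Int) (res : List (List String)) : List (List String) :=
  if _h : i ≤ j then
    howmuchLoop (i + 1) j
      (res ++ (if PySem.Int.mod i 9 = 1 ∧ PySem.Int.mod i 7 = 2 then [pvRow i] else []))
  else res
termination_by (j + 1 - i).toNat
decreasing_by omega

def howmuch (m : Int) (n : Int) : List (List String) :=
  howmuchLoop (min m n) (max m n) []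

-- ===== PORT B =====
def howmuch_alt (m : Int) (n : Int) : List (List String) :=
  let lo := min m n
  let hi := max m n
  let start := lo + PySem.Int.mod (37 - lo) 63
  (PySem.List.pyRange start (hi + 1) 63).map pvRow

-- ===== PRECONDITION & SPEC =====
def Spec_howmuch (m : Int) (n : Int) (out : List (List String)) : Prop := out = howmuch_alt m n
instance (m : Int) (n : Int) (out : List (List String)) : Decidable (Spec_howmuch m n out) := by unfold Spec_howmuch; infer_instance

-- ===== CLAIM (what is proved, stated in full; the proofs are below) =====
def Claim_equal_howmuch : Prop := ∀ (m : Int) (n : Int), Dom_howmuch m n → Spec_howmuch m n (howmuch m n)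

-- ===== LEMMAS AND PROOFS =====

theorem pyRange63_nil (a b : Int) (h : b ≤ a) : PySem.List.pyRange a b 63 = [] := by
  rw [PySem.List.pyRange_of_pos a b (by norm_num)]
  simp [show ¬ a < b by omega]

theorem pyRange63_cons (a b : Int) (h : a < b) :
    PySem.List.pyRange a b 63 = a :: PySem.List.pyRange (a + 63) b 63 := by
  rw [PySem.List.pyRange_of_pos a b (by norm_num), PySem.List.pyRange_of_pos (a + 63) b (by norm_num)]
  simp only [if_pos h]
  by_cases h2 : a + 63 < b
  · rw [if_pos h2]
    have e1 : ((b - a + 63 - 1) / 63).toNat = ((b - (a + 63) + 63 - 1) / 63).toNat + 1 := by omega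
    rw [e1, List.range_succ_eq_map, List.map_cons, List.map_map]
    refine congrArg₂ List.cons (by norm_num) ?_
    apply List.map_congr_left
    intro k _
    simp [Function.comp]
    ring
  · rw [if_neg h2]
    have e1 : ((b - a + 63 - 1) / 63).toNat = 1 := by omega
    rw [e1]
    norm_num

-- A's loop from i equals B's stepped range starting at the first t ≥ i with t ≡ 37 (mod 63)
theorem loop_eq (fuel : Nat) (i j : Int) (res : List (List String)) (hf : (j + 1 - i).toNat = fuel) :
    howmuchLoop i j res = res ++ (PySem.List.pyRange (i + PySem.Int.mod (37 - i) 63) (j + 1) 63).map pvRow := by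
  induction fuel generalizing i res with
  | zero =>
    have hij : ¬ i ≤ j := by omega
    rw [howmuchLoop, dif_neg hij]
    simp only [PySem.Int.mod_eq_emod_of_pos (show (0:Int) < 63 by norm_num)]
    have hm : 0 ≤ (37 - i) % 63 := Int.emod_nonneg _ (by norm_num)
    rw [pyRange63_nil _ _ (by omega)]
    simp
  | succ fuel ih =>
    by_cases hij : i ≤ j
    · rw [howmuchLoop, dif_pos hij]
      rw [ih (i + 1) _ (by omega)]
      simp only [PySem.Int.mod_eq_emod_of_pos (show (0:Int) < 63 by norm_num)]
      have hm : 0 ≤ (37 - i) % 63 ∧ (37 - i) % 63 < 63 :=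
        ⟨Int.emod_nonneg _ (by norm_num), Int.emod_lt_of_pos _ (by norm_num)⟩
      by_cases hc : (37 - i) % 63 = 0
      · -- i is a hit: i % 9 = 1 and i % 7 = 2
        have hcond : PySem.Int.mod i 9 = 1 ∧ PySem.Int.mod i 7 = 2 := by
          rw [PySem.Int.mod_eq_emod_of_pos (show (0:Int) < 9 by norm_num),
              PySem.Int.mod_eq_emod_of_pos (show (0:Int) < 7 by norm_num)]
          omega
        rw [if_pos hcond]
        have hstart : (37 - (i + 1)) % 63 = 62 := by omega
        rw [hstart, hc, show i + 1 + 62 = i + 63 by ring, show i + (0:Int) = i by ring]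
        rw [pyRange63_cons i (j + 1) (by omega)]
        simp
      · -- i is not a hit
        have hcond : ¬ (PySem.Int.mod i 9 = 1 ∧ PySem.Int.mod i 7 = 2) := by
          rw [PySem.Int.mod_eq_emod_of_pos (show (0:Int) < 9 by norm_num),
              PySem.Int.mod_eq_emod_of_pos (show (0:Int) < 7 by norm_num)]
          omega
        rw [if_neg hcond]
        have hstart : (i + 1) + (37 - (i + 1)) % 63 = i + (37 - i) % 63 := by omega
        rw [hstart]
        simp
    · rw [howmuchLoop, dif_neg hij]
      simp only [PySem.Int.mod_eq_emod_of_pos (show (0:Int) < 63 by norm_num)]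
      have hm : 0 ≤ (37 - i) % 63 := Int.emod_nonneg _ (by norm_num)
      rw [pyRange63_nil _ _ (by omega)]
      simp

-- ===== VERDICT (by name: the statement is the Claim_ definition above) =====
theorem howmuch_spec : Claim_equal_howmuch := by
  intro m n _
  unfold Spec_howmuch howmuch howmuch_alt
  rw [loop_eq ((max m n + 1 - min m n).toNat) (min m n) (max m n) [] rfl]
  simp
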